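-- pv_equiv track=rewrite | github.com/Nishant-ZFYII/nyc_hack | pipeline/ops_snapshot.py | _case_urgency
-- ===== SOURCE A (Python) =====
-- def _case_urgency(case: dict) -> str:
--     """Cheap urgency heuristic from the case's open needs."""
--     open_cats = [n.get("category", "") for n in case.get("needs", []) if n.get("status") != "resolved"]
--     if any(c in open_cats for c in ("safety", "medical", "emergency")):
--         return "critical"
--     if any(c in open_cats for c in ("housing", "shelter")):
--         return "high"
--     if open_cats:
--         return "medium"
--     return "low"
-- ===== SOURCE B (Python) =====
-- def _case_urgency(case: dict) -> str:
--     """Cheap urgency heuristic from the case's open needs (single-pass max rank)."""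
--     rank = 0
--     for n in case.get("needs", []):
--         if n.get("status") != "resolved":
--             c = n.get("category", "")
--             if c in ("safety", "medical", "emergency"):
--                 r = 3
--             elif c in ("housing", "shelter"):
--                 r = 2
--             else:
--                 r = 1
--             if r > rank:
--                 rank = r
--     return ("low", "medium", "high", "critical")[rank]
-- ===== Notes on version B (the rewrite author's own statement) =====
-- stated objective: simpler
-- what changed: Replaces the intermediate open-category list and three separate membership scans with a single pass over the needs that tracks the maximum urgency rank, then indexes a fixed tuple of labels.
import Mathlib
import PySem

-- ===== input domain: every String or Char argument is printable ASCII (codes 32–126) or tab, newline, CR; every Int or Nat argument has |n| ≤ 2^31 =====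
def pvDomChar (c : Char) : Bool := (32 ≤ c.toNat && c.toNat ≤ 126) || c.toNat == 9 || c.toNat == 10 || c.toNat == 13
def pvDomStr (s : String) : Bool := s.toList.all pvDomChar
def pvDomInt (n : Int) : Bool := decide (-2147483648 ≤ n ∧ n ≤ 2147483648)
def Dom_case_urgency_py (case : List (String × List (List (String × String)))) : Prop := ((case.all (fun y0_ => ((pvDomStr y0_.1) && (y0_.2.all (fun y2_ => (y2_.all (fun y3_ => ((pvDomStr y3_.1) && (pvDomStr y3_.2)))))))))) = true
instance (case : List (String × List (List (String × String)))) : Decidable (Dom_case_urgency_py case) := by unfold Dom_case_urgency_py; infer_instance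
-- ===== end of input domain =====

-- B replaces the intermediate open-category list and the three membership scans by a
-- single pass over the needs tracking the maximum urgency rank (objective: simpler).

-- ===== PORT A =====
-- dict lookup (first match in the association list), shared dict semantics for both ports
def pvGet {α : Type} (d : List (String × α)) (k : String) : Option α := d.lookup k

def case_urgency_py (case : List (String × List (List (String × String)))) : String :=
  let open_cats :=
    (((pvGet case "needs").getD []).filter
        (fun n => pvGet n "status" != some "resolved")).map
      (fun n => (pvGet n "category").getD "")
  if (["safety", "medical", "emergency"].any (fun c => open_cats.contains c)) then "critical"
  else if (["housing", "shelter"].any (fun c => open_cats.contains c)) then "high"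
  else if open_cats.isEmpty = false then "medium"
  else "low"

-- ===== PORT B =====
def pvRank (c : String) : Nat :=
  if c = "safety" ∨ c = "medical" ∨ c = "emergency" then 3
  else if c = "housing" ∨ c = "shelter" then 2
  else 1

def case_urgency_py_alt (case : List (String × List (List (String × String)))) : String :=
  let rank :=
    ((pvGet case "needs").getD []).foldl
      (fun r n =>
        if pvGet n "status" != some "resolved" then
          let rk := pvRank ((pvGet n "category").getD "")
          if rk > r then rk else r
        else r) 0
  match rank with
  | 0 => "low"
  | 1 => "medium"
  | 2 => "high"
  | _ => "critical"

-- ===== PRECONDITION & SPEC =====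
def Spec_case_urgency_py (case : List (String × List (List (String × String)))) (out : String) : Prop := out = case_urgency_py_alt case
instance (case : List (String × List (List (String × String)))) (out : String) : Decidable (Spec_case_urgency_py case out) := by unfold Spec_case_urgency_py; infer_instance

-- ===== CLAIM (what is proved, stated in full; the proofs are below) =====
def Claim_equal_case_urgency_py : Prop := ∀ (case : List (String × List (List (String × String)))), Dom_case_urgency_py case → Spec_case_urgency_py case (case_urgency_py case)

-- ===== LEMMAS AND PROOFS =====

-- B's fold over the needs equals a max-fold over A's open-category list
theorem pvFold_filter_map (needs : List (List (String × String))) (r : Nat) :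
    needs.foldl
      (fun r n =>
        if pvGet n "status" != some "resolved" then
          let rk := pvRank ((pvGet n "category").getD "")
          if rk > r then rk else r
        else r) r
    = ((needs.filter (fun n => pvGet n "status" != some "resolved")).map
        (fun n => (pvGet n "category").getD "")).foldl
        (fun r c => max r (pvRank c)) r := by
  induction needs generalizing r with
  | nil => rfl
  | cons n ns ih =>
    by_cases h : (pvGet n "status" != some "resolved") = true
    · simp only [List.foldl, List.filter_cons, h, if_pos, List.map_cons, ih]
      congr 1
      split <;> omega
    · simp only [List.foldl, List.filter_cons, h, Bool.false_eq_true, ih]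
      simp

def pvM (l : List String) : Nat := l.foldl (fun r c => max r (pvRank c)) 0

theorem pvFold_shift (l : List String) (r : Nat) :
    l.foldl (fun r c => max r (pvRank c)) r
      = max r (l.foldl (fun r c => max r (pvRank c)) 0) := by
  induction l generalizing r with
  | nil => simp
  | cons c l ih =>
    simp only [List.foldl]
    rw [ih, ih (max 0 _)]
    omega

theorem pvRank_pos (c : String) : 1 ≤ pvRank c := by
  unfold pvRank; split_ifs <;> omega

theorem pvRank_le (c : String) : pvRank c ≤ 3 := by
  unfold pvRank; split_ifs <;> omega

theorem pvM_cons (c : String) (l : List String) :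
    pvM (c :: l) = max (pvRank c) (pvM l) := by
  simp only [pvM, List.foldl]
  rw [pvFold_shift]
  omega

theorem pvM_le (l : List String) : pvM l ≤ 3 := by
  induction l with
  | nil => simp [pvM]
  | cons c l ih => rw [pvM_cons]; have := pvRank_le c; omega

theorem pvM_mem_le {c : String} {l : List String} (h : c ∈ l) : pvRank c ≤ pvM l := by
  induction l with
  | nil => cases h
  | cons d l ih =>
    rw [pvM_cons]
    rcases List.mem_cons.mp h with h | h
    · subst h; omega
    · have := ih h; omega

theorem pvM_attained (l : List String) : pvM l = 0 ∨ ∃ c ∈ l, pvRank c = pvM l := by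
  induction l with
  | nil => left; rfl
  | cons c l ih =>
    right
    rw [pvM_cons]
    by_cases h : pvM l ≤ pvRank c
    · exact ⟨c, List.mem_cons_self, by omega⟩
    · rcases ih with h0 | ⟨d, hd, hdr⟩
      · omega
      · exact ⟨d, List.mem_cons_of_mem _ hd, by omega⟩

theorem pvM_eq_zero_iff (l : List String) : pvM l = 0 ↔ l = [] := by
  constructor
  · intro h
    cases l with
    | nil => rfl
    | cons c l =>
      rw [pvM_cons] at h
      have := pvRank_pos c
      omega
  · rintro rfl; rfl

theorem pvRank_eq_three_iff (c : String) :
    pvRank c = 3 ↔ (c = "safety" ∨ c = "medical" ∨ c = "emergency") := by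
  unfold pvRank
  split_ifs with h1 h2
  · simp [h1]
  · simp [h1]
  · simp [h1]

theorem pvRank_eq_two_iff (c : String) :
    pvRank c = 2 ↔ (c = "housing" ∨ c = "shelter") := by
  unfold pvRank
  split_ifs with h1 h2
  · rcases h1 with rfl | rfl | rfl <;> simp
  · simp [h2]
  · simp [h2]

-- A's membership conditions expressed through ranks
theorem pvMem3 (l : List String) :
    ("safety" ∈ l ∨ "medical" ∈ l ∨ "emergency" ∈ l) ↔ ∃ c ∈ l, pvRank c = 3 := by
  constructor
  · rintro (h | h | h) <;> exact ⟨_, h, by decide⟩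
  · rintro ⟨c, hm, hr⟩
    rcases (pvRank_eq_three_iff c).mp hr with rfl | rfl | rfl <;> tauto

theorem pvMem2 (l : List String) :
    ("housing" ∈ l ∨ "shelter" ∈ l) ↔ ∃ c ∈ l, pvRank c = 2 := by
  constructor
  · rintro (h | h) <;> exact ⟨_, h, by decide⟩
  · rintro ⟨c, hm, hr⟩
    rcases (pvRank_eq_two_iff c).mp hr with rfl | rfl <;> tauto

-- ===== VERDICT (by name: the statement is the Claim_ definition above) =====
theorem case_urgency_py_spec : Claim_equal_case_urgency_py := by
  intro case _
  unfold Spec_case_urgency_py case_urgency_py case_urgency_py_alt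
  rw [pvFold_filter_map]
  set ocs := (((pvGet case "needs").getD []).filter
      (fun n => pvGet n "status" != some "resolved")).map
      (fun n => (pvGet n "category").getD "") with hocs
  show _ = (match pvM ocs with
    | 0 => "low" | 1 => "medium" | 2 => "high" | _ => "critical")
  have hle := pvM_le ocs
  interval_cases h : pvM ocs
  · -- pvM = 0 : ocs empty, all conditions false
    have hnil : ocs = [] := (pvM_eq_zero_iff ocs).mp h
    simp [hnil]
  · -- pvM = 1 : no rank-3, no rank-2 member, ocs nonempty
    have h3 : ¬ ("safety" ∈ ocs ∨ "medical" ∈ ocs ∨ "emergency" ∈ ocs) := by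
      rw [pvMem3]; rintro ⟨c, hm, hr⟩; have := pvM_mem_le hm; omega
    have h2 : ¬ ("housing" ∈ ocs ∨ "shelter" ∈ ocs) := by
      rw [pvMem2]; rintro ⟨c, hm, hr⟩; have := pvM_mem_le hm; omega
    have hne : ocs ≠ [] := by
      intro hnil; rw [(pvM_eq_zero_iff ocs).mpr hnil] at h; omega
    simp [h3, h2, hne]
  · -- pvM = 2 : no rank-3 member, some rank-2 member
    have h3 : ¬ ("safety" ∈ ocs ∨ "medical" ∈ ocs ∨ "emergency" ∈ ocs) := by
      rw [pvMem3]; rintro ⟨c, hm, hr⟩; have := pvM_mem_le hm; omega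
    have h2 : ("housing" ∈ ocs ∨ "shelter" ∈ ocs) := by
      rw [pvMem2]
      rcases pvM_attained ocs with h0 | ⟨c, hm, hr⟩
      · omega
      · exact ⟨c, hm, by omega⟩
    simp [h3, h2]
  · -- pvM = 3 : some rank-3 member
    have h3 : ("safety" ∈ ocs ∨ "medical" ∈ ocs ∨ "emergency" ∈ ocs) := by
      rw [pvMem3]
      rcases pvM_attained ocs with h0 | ⟨c, hm, hr⟩
      · omega
      · exact ⟨c, hm, by omega⟩
    simp [h3]
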